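-- pv_equiv track=rewrite | github.com/barteksmolkowski/adventofcode_2024 | Dni 2023/12_dzien.py | SprawdzMozl
-- ===== SOURCE A (Python) =====
-- def SprawdzMozl(wiersz, liczby):
--     liczbaLen = 0
--     numerIdx = 0
--
--     for znak in wiersz + ".":
--         if znak == "#":
--             liczbaLen += 1
--         elif liczbaLen > 0:
--             if numerIdx >= len(liczby) or liczby[numerIdx] != liczbaLen:
--                 return False
--             numerIdx += 1
--             liczbaLen = 0
--
--     return numerIdx == len(liczby)
-- ===== SOURCE B (Python) =====
-- def SprawdzMozl(wiersz, liczby):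
--     # Extract all contiguous '#'-run lengths first, then compare to the groups.
--     groups = []
--     i = 0
--     n = len(wiersz)
--     while i < n:
--         if wiersz[i] == "#":
--             j = i
--             while j < n and wiersz[j] == "#":
--                 j += 1
--             groups.append(j - i)
--             i = j
--         else:
--             i += 1
--     return groups == list(liczby)
-- ===== Notes on version B (the rewrite author's own statement) =====
-- stated objective: alternative
-- what changed: B extracts the full list of contiguous '#'-run lengths first (an index scan that skips each run) and then compares that list to liczby, instead of A's streaming char-by-char accumulator that interleaves counting with comparison and early return over wiersz+'.'.
import Mathlib
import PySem

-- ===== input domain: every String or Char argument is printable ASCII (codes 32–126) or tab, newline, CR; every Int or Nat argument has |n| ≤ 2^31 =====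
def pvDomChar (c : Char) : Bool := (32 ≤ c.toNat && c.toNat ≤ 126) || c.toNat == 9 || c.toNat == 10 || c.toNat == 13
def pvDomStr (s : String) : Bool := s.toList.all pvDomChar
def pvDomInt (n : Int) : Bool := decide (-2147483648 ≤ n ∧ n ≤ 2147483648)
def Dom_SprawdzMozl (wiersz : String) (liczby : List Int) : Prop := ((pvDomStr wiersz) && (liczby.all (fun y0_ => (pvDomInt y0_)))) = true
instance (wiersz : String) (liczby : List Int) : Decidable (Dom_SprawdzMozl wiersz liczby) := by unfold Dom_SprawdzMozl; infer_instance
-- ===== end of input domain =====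

-- B extracts the full list of contiguous '#'-run lengths and then compares it to liczby,
-- instead of A's streaming accumulator loop interleaving counting, comparison and early return.


-- ===== PORT A =====
-- the for-loop of A over `wiersz + "."` with state (liczbaLen, numerIdx); early `return False`
-- is the `false` branches
def pvLoopA (liczby : List Int) : List Char → Int → Int → Bool
  | [], _, numerIdx => numerIdx == (liczby.length : Int)
  | znak :: rest, liczbaLen, numerIdx =>
    if znak == '#' then pvLoopA liczby rest (liczbaLen + 1) numerIdx
    else if liczbaLen > 0 then
      if numerIdx ≥ (liczby.length : Int) then false
      else if PySem.List.pyGet? liczby numerIdx ≠ some liczbaLen then false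
      else pvLoopA liczby rest 0 (numerIdx + 1)
    else pvLoopA liczby rest liczbaLen numerIdx

def SprawdzMozl (wiersz : String) (liczby : List Int) : Bool :=
  pvLoopA liczby (wiersz.toList ++ ['.']) 0 0

-- ===== PORT B =====
-- the inner `while run < len(s) and s[run] == '#'` of B: number of leading '#'
def pvRunLen : List Char → Nat
  | [] => 0
  | c :: rest => if c == '#' then pvRunLen rest + 1 else 0

theorem pvRunLen_le (cs : List Char) : pvRunLen cs ≤ cs.length := by
  induction cs with
  | nil => simp [pvRunLen]
  | cons c rest ih => simp only [pvRunLen]; split <;> simp <;> omega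

-- the outer while-loop of B over the remaining string `s`, collecting run lengths
def pvRunsB : List Char → List Int
  | [] => []
  | c :: rest =>
    if c == '#' then
      let run := pvRunLen (c :: rest)
      (run : Int) :: pvRunsB ((c :: rest).drop run)
    else pvRunsB rest
termination_by cs => cs.length
decreasing_by
  · have h := pvRunLen_le rest
    simp only [pvRunLen, if_pos ‹c == '#'›, List.drop_succ_cons, List.length_drop, List.length_cons]
    omega
  · simp

def SprawdzMozl_alt (wiersz : String) (liczby : List Int) : Bool :=
  pvRunsB wiersz.toList == liczby

-- ===== PRECONDITION & SPEC =====
def Spec_SprawdzMozl (wiersz : String) (liczby : List Int) (out : Bool) : Prop := out = SprawdzMozl_alt wiersz liczby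
instance (wiersz : String) (liczby : List Int) (out : Bool) : Decidable (Spec_SprawdzMozl wiersz liczby out) := by unfold Spec_SprawdzMozl; infer_instance

-- ===== CLAIM (what is proved, stated in full; the proofs are below) =====
def Claim_equal_SprawdzMozl : Prop := ∀ (wiersz : String) (liczby : List Int), Dom_SprawdzMozl wiersz liczby → Spec_SprawdzMozl wiersz liczby (SprawdzMozl wiersz liczby)

-- ===== LEMMAS AND PROOFS =====

-- canonical intermediate: '#'-run lengths, with a pending run of length p
def pvRunsP : Nat → List Char → List Int
  | _, [] => []
  | p, c :: rest =>
    if c == '#' then pvRunsP (p + 1) rest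
    else if p > 0 then (p : Int) :: pvRunsP 0 rest else pvRunsP 0 rest

theorem pvRunsP_hash (cs : List Char) : ∀ p : Nat,
    pvRunsP p cs = pvRunsP (p + pvRunLen cs) (cs.drop (pvRunLen cs)) := by
  induction cs with
  | nil => intro p; simp [pvRunLen]
  | cons c rest ih =>
    intro p
    by_cases h : c = '#'
    · subst h
      have hk : pvRunLen ('#' :: rest) = pvRunLen rest + 1 := by simp [pvRunLen]
      rw [hk, List.drop_succ_cons]
      have h1 : pvRunsP p ('#' :: rest) = pvRunsP (p + 1) rest := by simp [pvRunsP]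
      rw [h1, ih (p + 1)]
      have : p + 1 + pvRunLen rest = p + (pvRunLen rest + 1) := by omega
      rw [this]
    · simp [pvRunsP, pvRunLen, h]

theorem pvRunLen_drop (cs : List Char) :
    cs.drop (pvRunLen cs) = [] ∨ ∃ d t, cs.drop (pvRunLen cs) = d :: t ∧ d ≠ '#' := by
  induction cs with
  | nil => left; simp
  | cons c rest ih =>
    by_cases h : c = '#'
    · simpa [pvRunLen, h] using ih
    · right; exact ⟨c, rest, by simp [pvRunLen, h], h⟩

theorem pvRunLen_append_dot (cs : List Char) : pvRunLen (cs ++ ['.']) = pvRunLen cs := by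
  induction cs with
  | nil => simp [pvRunLen]
  | cons c rest ih => simp only [List.cons_append, pvRunLen, ih]

theorem pvRunsP_eq_pvRunsB : ∀ (n : Nat) (cs : List Char), cs.length ≤ n →
    pvRunsP 0 (cs ++ ['.']) = pvRunsB cs := by
  intro n
  induction n with
  | zero =>
    intro cs h
    have : cs = [] := List.eq_nil_of_length_eq_zero (by omega)
    subst this; simp [pvRunsP, pvRunsB]
  | succ n ih =>
    intro cs h
    match cs with
    | [] => simp [pvRunsP, pvRunsB]
    | c :: rest =>
      by_cases hc : c = '#'
      · rw [pvRunsP_hash, pvRunLen_append_dot]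
        set k := pvRunLen (c :: rest) with hk
        have hk1 : 1 ≤ k := by simp [hk, pvRunLen, hc]
        have hkle : k ≤ (c :: rest).length := pvRunLen_le _
        have hdrop : ((c :: rest) ++ ['.']).drop k = (c :: rest).drop k ++ ['.'] :=
          List.drop_append_of_le_length hkle
        rw [hdrop]
        rcases pvRunLen_drop (c :: rest) with h0 | ⟨d, t, ht, hd⟩
        · rw [← hk] at h0
          rw [h0]
          have hP : pvRunsP (0 + k) ([] ++ ['.']) = [(k : Int)] := by
            simp only [List.nil_append, pvRunsP]
            rw [if_neg (by decide), if_pos (by omega)]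
            simp [pvRunsP]
          rw [hP, pvRunsB, if_pos (by simp [hc])]
          show [(k : Int)] = (k : Int) :: pvRunsB (List.drop k (c :: rest))
          rw [h0]
          simp [pvRunsB]
        · rw [← hk] at ht
          rw [ht]
          have hlen : t.length + 1 = (c :: rest).length - k := by
            have := congrArg List.length ht
            rw [List.length_drop] at this
            simp only [List.length_cons] at this ⊢
            omega
          rw [pvRunsB, if_pos (by simp [hc])]
          show _ = (k : Int) :: pvRunsB (List.drop k (c :: rest))
          rw [ht]
          have hrec : pvRunsP 0 (t ++ ['.']) = pvRunsB t := by
            apply ih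
            simp only [List.length_cons] at h hlen
            omega
          simp only [pvRunsP, List.cons_append]
          rw [if_neg (by simp [hd]), if_pos (by omega), hrec]
          simp [pvRunsB, hd]
      · rw [pvRunsB]
        rw [if_neg (by simp [hc])]
        have : pvRunsP 0 ((c :: rest) ++ ['.']) = pvRunsP 0 (rest ++ ['.']) := by
          simp [pvRunsP, hc]
        rw [this]
        exact ih rest (by simp at h; omega)

theorem pvLoopA_eq (liczby : List Int) :
    ∀ (cs : List Char) (p idx : Nat), idx ≤ liczby.length →
    pvLoopA liczby cs (p : Int) (idx : Int)
      = decide (liczby.drop idx = pvRunsP p cs) := by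
  intro cs
  induction cs with
  | nil =>
    intro p idx hle
    simp only [pvLoopA, pvRunsP]
    by_cases h : idx = liczby.length
    · subst h; simp [List.drop_eq_nil_iff]
    · have h1 : ((idx : Int) == (liczby.length : Int)) = false := by simp; omega
      rw [h1]
      symm
      rw [decide_eq_false_iff_not, List.drop_eq_nil_iff]
      omega
  | cons c rest ih =>
    intro p idx hle
    by_cases hc : c = '#'
    · simp only [pvLoopA, pvRunsP, if_pos (show (c == '#') = true by simp [hc])]
      have : (p : Int) + 1 = ((p + 1 : Nat) : Int) := by push_cast; ring
      rw [this]
      exact ih (p + 1) idx hle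
    · by_cases hp : 0 < p
      · simp only [pvLoopA, pvRunsP, if_neg (show ¬ (c == '#') = true by simp [hc]),
          if_pos (show (p : Int) > 0 by exact_mod_cast hp), if_pos hp]
        by_cases hidx : idx < liczby.length
        · rw [if_neg (by push_cast; omega)]
          have hget : PySem.List.pyGet? liczby (idx : Int) = some liczby[idx] :=
            PySem.List.pyGet?_ofNat _ _ hidx
          have hdropc : liczby.drop idx = liczby[idx] :: liczby.drop (idx + 1) :=
            List.drop_eq_getElem_cons hidx
          by_cases heq : liczby[idx] = (p : Int)
          · rw [if_neg (by simp [hget, heq])]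
            have hcast : (idx : Int) + 1 = ((idx + 1 : Nat) : Int) := by push_cast; ring
            have hih := ih 0 (idx + 1) (by omega)
            rw [Nat.cast_zero] at hih
            rw [hcast, hih, hdropc]
            simp [heq]
          · rw [if_pos (by simp [hget, heq])]
            symm
            rw [decide_eq_false_iff_not, hdropc]
            intro hcontra
            injection hcontra with h1 _
            exact heq h1
        · rw [if_pos (by push_cast; omega)]
          have : liczby.drop idx = [] := by rw [List.drop_eq_nil_iff]; omega
          symm; simp [this]
      · have hp0 : p = 0 := by omega
        subst hp0
        simp only [pvLoopA, pvRunsP, if_neg (show ¬ (c == '#') = true by simp [hc])]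
        rw [if_neg (by norm_num), if_neg (by omega)]
        exact ih 0 idx hle

-- ===== VERDICT (by name: the statement is the Claim_ definition above) =====
theorem SprawdzMozl_spec : Claim_equal_SprawdzMozl := by
  intro wiersz liczby _
  unfold Spec_SprawdzMozl SprawdzMozl SprawdzMozl_alt
  have h := pvLoopA_eq liczby (wiersz.toList ++ ['.']) 0 0 (Nat.zero_le _)
  simp only [Nat.cast_zero] at h
  rw [h, pvRunsP_eq_pvRunsB wiersz.toList.length wiersz.toList (le_refl _), List.drop_zero]
  by_cases hEq : liczby = pvRunsB wiersz.toList
  · simp [hEq]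
  · rw [decide_eq_false hEq]
    symm
    rw [beq_eq_false_iff_ne]
    exact fun he => hEq he.symm
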